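-- pv_equiv track=rewrite | github.com/yugao-uoft/Galapagos_Cluster_Builder | python_scripts/utils.py | get_num_compute_kernel_per_cluster
-- ===== SOURCE A (Python) =====
-- def get_num_compute_kernel_per_cluster(json_object, num_compute_kernel_per_layer):
--     cluster = json_object['cluster']
--     # compute number of kernels for each cluster, only compute kernels
--     num_kernel_per_cluster = [0 for _ in range(len(cluster))]
--     for i in range(len(cluster)):
--         temp = 0
--         for j in range(len(cluster[i])):
--             if cluster[i][j] == 'attention_0':
--                 temp += num_compute_kernel_per_layer[0]
--             elif cluster[i][j] == 'attention_1':
--                 temp += num_compute_kernel_per_layer[1]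
--             elif cluster[i][j] == 'attention_2':
--                 temp += num_compute_kernel_per_layer[2]
--             elif cluster[i][j] == 'attention_output_0':
--                 temp += num_compute_kernel_per_layer[3]
--             elif cluster[i][j] == 'attention_output_1':
--                 temp += num_compute_kernel_per_layer[4]
--             elif cluster[i][j] == 'intermediate_0':
--                 temp += num_compute_kernel_per_layer[5]
--             elif cluster[i][j] == 'intermediate_output_0':
--                 temp += num_compute_kernel_per_layer[6]
--             elif cluster[i][j] == 'intermediate_output_1':
--                 temp += num_compute_kernel_per_layer[7]
--         num_kernel_per_cluster[i] = temp
--     return num_kernel_per_cluster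
-- ===== SOURCE B (Python) =====
-- _LABELS = ['attention_0', 'attention_1', 'attention_2',
--            'attention_output_0', 'attention_output_1',
--            'intermediate_0', 'intermediate_output_0', 'intermediate_output_1']
--
--
-- def get_num_compute_kernel_per_cluster(json_object, num_compute_kernel_per_layer):
--     totals = []
--     for labels in json_object['cluster']:
--         freq = {}
--         for lbl in labels:
--             freq[lbl] = freq.get(lbl, 0) + 1
--         totals.append(sum(freq[name] * num_compute_kernel_per_layer[idx]
--                           for idx, name in enumerate(_LABELS) if name in freq))
--     return totals
-- ===== Notes on version B (the rewrite author's own statement) =====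
-- stated objective: idiomatic
-- what changed: Replaces the per-element 8-way if-elif accumulator with a two-phase count-then-weighted-sum: build a frequency histogram of each cluster's labels, then dot-product it against the fixed label list with their per-layer kernel weights.
import Mathlib
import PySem

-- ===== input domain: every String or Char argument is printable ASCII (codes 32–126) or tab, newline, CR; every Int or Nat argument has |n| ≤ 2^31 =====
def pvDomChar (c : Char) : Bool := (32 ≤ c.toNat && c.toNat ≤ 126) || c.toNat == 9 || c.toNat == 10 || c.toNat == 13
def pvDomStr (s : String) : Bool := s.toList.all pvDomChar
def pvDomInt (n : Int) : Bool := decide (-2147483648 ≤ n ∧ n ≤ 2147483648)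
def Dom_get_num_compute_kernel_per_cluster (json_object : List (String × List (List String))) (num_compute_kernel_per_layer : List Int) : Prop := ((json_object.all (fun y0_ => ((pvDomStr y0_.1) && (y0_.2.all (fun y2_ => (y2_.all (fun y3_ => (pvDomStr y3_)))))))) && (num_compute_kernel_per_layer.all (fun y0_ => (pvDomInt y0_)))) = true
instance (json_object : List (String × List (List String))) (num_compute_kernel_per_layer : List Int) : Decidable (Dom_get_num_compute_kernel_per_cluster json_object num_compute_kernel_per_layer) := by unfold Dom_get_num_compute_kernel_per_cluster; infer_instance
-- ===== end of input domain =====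

-- B replaces A's per-element 8-way if-elif accumulator with a per-cluster frequency
-- histogram dotted against the fixed label list (idiomatic count-then-weighted-sum).


-- ===== PORT A =====
def get_num_compute_kernel_per_cluster (json_object : List (String × List (List String))) (num_compute_kernel_per_layer : List Int) : List Int :=
  match (PySem.Dict.mk json_object).get? "cluster" with
  | none => []   -- KeyError in Python; excluded by Pre_
  | some cluster =>
    -- for i in range(len(cluster)): temp = 0; for j …: if-elif chain; result list in order
    cluster.map (fun ci =>
      ci.foldl (fun temp lbl =>
        if lbl = "attention_0" then temp + PySem.List.pyGetD num_compute_kernel_per_layer 0 0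
        else if lbl = "attention_1" then temp + PySem.List.pyGetD num_compute_kernel_per_layer 1 0
        else if lbl = "attention_2" then temp + PySem.List.pyGetD num_compute_kernel_per_layer 2 0
        else if lbl = "attention_output_0" then temp + PySem.List.pyGetD num_compute_kernel_per_layer 3 0
        else if lbl = "attention_output_1" then temp + PySem.List.pyGetD num_compute_kernel_per_layer 4 0
        else if lbl = "intermediate_0" then temp + PySem.List.pyGetD num_compute_kernel_per_layer 5 0
        else if lbl = "intermediate_output_0" then temp + PySem.List.pyGetD num_compute_kernel_per_layer 6 0
        else if lbl = "intermediate_output_1" then temp + PySem.List.pyGetD num_compute_kernel_per_layer 7 0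
        else temp) 0)

-- ===== PORT B =====
def pvLabels : List String :=
  ["attention_0", "attention_1", "attention_2", "attention_output_0", "attention_output_1",
   "intermediate_0", "intermediate_output_0", "intermediate_output_1"]

def get_num_compute_kernel_per_cluster_alt (json_object : List (String × List (List String))) (num_compute_kernel_per_layer : List Int) : List Int :=
  match (PySem.Dict.mk json_object).get? "cluster" with
  | none => []   -- KeyError in Python; excluded by Pre_
  | some cluster =>
    cluster.map (fun labels =>
      let freq := labels.foldl (fun d lbl => d.insert lbl (d.getD lbl 0 + 1)) PySem.Dict.empty
      (PySem.List.enumerate pvLabels 0).foldl (fun acc p =>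
        if freq.contains p.2 then acc + freq.getD p.2 0 * PySem.List.pyGetD num_compute_kernel_per_layer p.1 0 else acc) 0)

-- ===== PRECONDITION & SPEC =====
-- Pre_ excludes exactly the inputs where Python A raises: a missing 'cluster' key (KeyError), and
-- clusters containing the k-th known label while num_compute_kernel_per_layer has ≤ k entries (IndexError).
def Pre_get_num_compute_kernel_per_cluster (json_object : List (String × List (List String))) (num_compute_kernel_per_layer : List Int) : Prop :=
  (PySem.Dict.mk json_object).contains "cluster" = true ∧
  ∀ p ∈ pvLabels.zipIdx, (∃ c ∈ (PySem.Dict.mk json_object).getD "cluster" [], p.1 ∈ c) →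
    p.2 < num_compute_kernel_per_layer.length
instance (json_object : List (String × List (List String))) (num_compute_kernel_per_layer : List Int) : Decidable (Pre_get_num_compute_kernel_per_cluster json_object num_compute_kernel_per_layer) := by unfold Pre_get_num_compute_kernel_per_cluster; infer_instance

def pvWitness_get_num_compute_kernel_per_cluster : (List (String × List (List String))) × List Int :=
  ([("cluster", [["attention_0", "intermediate_0", "attention_0"], ["junk"]])], [2, 3, 5, 7, 11, 13, 17, 19])

def Spec_get_num_compute_kernel_per_cluster (json_object : List (String × List (List String))) (num_compute_kernel_per_layer : List Int) (out : List Int) : Prop := out = get_num_compute_kernel_per_cluster_alt json_object num_compute_kernel_per_layer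
instance (json_object : List (String × List (List String))) (num_compute_kernel_per_layer : List Int) (out : List Int) : Decidable (Spec_get_num_compute_kernel_per_cluster json_object num_compute_kernel_per_layer out) := by unfold Spec_get_num_compute_kernel_per_cluster; infer_instance

-- ===== CLAIM (what is proved, stated in full; the proofs are below) =====
def Claim_equal_get_num_compute_kernel_per_cluster : Prop := ∀ (json_object : List (String × List (List String))) (num_compute_kernel_per_layer : List Int), Dom_get_num_compute_kernel_per_cluster json_object num_compute_kernel_per_layer → Pre_get_num_compute_kernel_per_cluster json_object num_compute_kernel_per_layer → Spec_get_num_compute_kernel_per_cluster json_object num_compute_kernel_per_layer (get_num_compute_kernel_per_cluster json_object num_compute_kernel_per_layer)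

-- ===== LEMMAS AND PROOFS =====

-- the per-element weight A adds for one label
def pvWeight (w : List Int) (lbl : String) : Int :=
  if lbl = "attention_0" then PySem.List.pyGetD w 0 0
  else if lbl = "attention_1" then PySem.List.pyGetD w 1 0
  else if lbl = "attention_2" then PySem.List.pyGetD w 2 0
  else if lbl = "attention_output_0" then PySem.List.pyGetD w 3 0
  else if lbl = "attention_output_1" then PySem.List.pyGetD w 4 0
  else if lbl = "intermediate_0" then PySem.List.pyGetD w 5 0
  else if lbl = "intermediate_output_0" then PySem.List.pyGetD w 6 0
  else if lbl = "intermediate_output_1" then PySem.List.pyGetD w 7 0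
  else 0

lemma pvSum_eq (w : List Int) (c : List String) :
    (c.map (pvWeight w)).sum =
      (c.count "attention_0" : Int) * PySem.List.pyGetD w 0 0 +
      (c.count "attention_1" : Int) * PySem.List.pyGetD w 1 0 +
      (c.count "attention_2" : Int) * PySem.List.pyGetD w 2 0 +
      (c.count "attention_output_0" : Int) * PySem.List.pyGetD w 3 0 +
      (c.count "attention_output_1" : Int) * PySem.List.pyGetD w 4 0 +
      (c.count "intermediate_0" : Int) * PySem.List.pyGetD w 5 0 +
      (c.count "intermediate_output_0" : Int) * PySem.List.pyGetD w 6 0 +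
      (c.count "intermediate_output_1" : Int) * PySem.List.pyGetD w 7 0 := by
  induction c with
  | nil => simp
  | cons x c ih =>
    simp only [List.map_cons, List.sum_cons, ih, List.count_cons]
    by_cases h0 : x = "attention_0"
    · subst h0; simp [pvWeight]; ring_nf
    by_cases h1 : x = "attention_1"
    · subst h1; simp [pvWeight]; ring_nf
    by_cases h2 : x = "attention_2"
    · subst h2; simp [pvWeight]; ring_nf
    by_cases h3 : x = "attention_output_0"
    · subst h3; simp [pvWeight]; ring_nf
    by_cases h4 : x = "attention_output_1"
    · subst h4; simp [pvWeight]; ring_nf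
    by_cases h5 : x = "intermediate_0"
    · subst h5; simp [pvWeight]; ring_nf
    by_cases h6 : x = "intermediate_output_0"
    · subst h6; simp [pvWeight]; ring_nf
    by_cases h7 : x = "intermediate_output_1"
    · subst h7; simp [pvWeight]; ring_nf
    · simp [pvWeight, h0, h1, h2, h3, h4, h5, h6, h7]

lemma pvInner_eq (w : List Int) (c : List String) :
    c.foldl (fun temp lbl =>
        if lbl = "attention_0" then temp + PySem.List.pyGetD w 0 0
        else if lbl = "attention_1" then temp + PySem.List.pyGetD w 1 0
        else if lbl = "attention_2" then temp + PySem.List.pyGetD w 2 0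
        else if lbl = "attention_output_0" then temp + PySem.List.pyGetD w 3 0
        else if lbl = "attention_output_1" then temp + PySem.List.pyGetD w 4 0
        else if lbl = "intermediate_0" then temp + PySem.List.pyGetD w 5 0
        else if lbl = "intermediate_output_0" then temp + PySem.List.pyGetD w 6 0
        else if lbl = "intermediate_output_1" then temp + PySem.List.pyGetD w 7 0
        else temp) 0 =
    (let freq := c.foldl (fun d lbl => d.insert lbl (d.getD lbl 0 + 1)) PySem.Dict.empty;
      (PySem.List.enumerate pvLabels 0).foldl (fun acc p =>
        if freq.contains p.2 then acc + freq.getD p.2 0 * PySem.List.pyGetD w p.1 0 else acc) 0) := by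
  have hA : c.foldl (fun temp lbl =>
        if lbl = "attention_0" then temp + PySem.List.pyGetD w 0 0
        else if lbl = "attention_1" then temp + PySem.List.pyGetD w 1 0
        else if lbl = "attention_2" then temp + PySem.List.pyGetD w 2 0
        else if lbl = "attention_output_0" then temp + PySem.List.pyGetD w 3 0
        else if lbl = "attention_output_1" then temp + PySem.List.pyGetD w 4 0
        else if lbl = "intermediate_0" then temp + PySem.List.pyGetD w 5 0
        else if lbl = "intermediate_output_0" then temp + PySem.List.pyGetD w 6 0
        else if lbl = "intermediate_output_1" then temp + PySem.List.pyGetD w 7 0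
        else temp) 0 = (c.map (pvWeight w)).sum := by
    have : (fun (temp : Int) (lbl : String) =>
        if lbl = "attention_0" then temp + PySem.List.pyGetD w 0 0
        else if lbl = "attention_1" then temp + PySem.List.pyGetD w 1 0
        else if lbl = "attention_2" then temp + PySem.List.pyGetD w 2 0
        else if lbl = "attention_output_0" then temp + PySem.List.pyGetD w 3 0
        else if lbl = "attention_output_1" then temp + PySem.List.pyGetD w 4 0
        else if lbl = "intermediate_0" then temp + PySem.List.pyGetD w 5 0
        else if lbl = "intermediate_output_0" then temp + PySem.List.pyGetD w 6 0
        else if lbl = "intermediate_output_1" then temp + PySem.List.pyGetD w 7 0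
        else temp) = fun temp lbl => temp + pvWeight w lbl := by
      funext temp lbl
      unfold pvWeight
      split_ifs <;> simp
    rw [this, PySem.List.foldl_add]
    simp
  rw [hA, pvSum_eq]
  rw [show c.foldl (fun d lbl => d.insert lbl (d.getD lbl 0 + 1)) PySem.Dict.empty
        = PySem.Dict.counter c from PySem.Dict.foldl_insert_getD_add_one_eq_counter c]
  simp only [pvLabels, PySem.List.enumerate, List.foldl_cons, List.foldl_nil,
    PySem.Dict.contains_counter, PySem.Dict.getD_counter]
  have hif : ∀ (acc : Int) (s : String) (g : Int),
      (if c.contains s = true then acc + (c.count s : Int) * g else acc) = acc + (c.count s : Int) * g := by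
    intro acc s g
    by_cases h : c.contains s = true
    · rw [if_pos h]
    · rw [if_neg h]
      have h0 : c.count s = 0 := by
        simp only [List.contains_eq_mem, decide_eq_true_eq] at h
        simpa [List.count_eq_zero] using h
      simp [h0]
  simp only [hif]
  ring_nf

-- ===== VERDICT (by name: the statement is the Claim_ definition above) =====
theorem get_num_compute_kernel_per_cluster_spec : Claim_equal_get_num_compute_kernel_per_cluster := by
  intro json_object num_compute_kernel_per_layer _hDom _hPre
  unfold Spec_get_num_compute_kernel_per_cluster
  unfold get_num_compute_kernel_per_cluster get_num_compute_kernel_per_cluster_alt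
  cases (PySem.Dict.mk json_object).get? "cluster" with
  | none => rfl
  | some cluster =>
    simp only
    exact List.map_congr_left (fun c _ => pvInner_eq num_compute_kernel_per_layer c)
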